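-- pv_equiv track=rewrite | github.com/Miika0320/uo | ITI1120 - Python 2020/a3_300164161/a3_part2_300164161.py | weaveop
-- ===== SOURCE A (Python) =====
-- def weaveop(s):
--     '''
--     str -> str
--
--     Preconditions: str must be in quotations
--
--     returns given string with op in between every pair of alpha characters,
--     where the capitalization of o is the same as the first char in the pair and
--     where the capitalization of p is the same as the second char in the pair
--     '''
--     s1 = s
--     m = 0
--     for i in range(len(s)-1):
--
--         if (s[i] + s[i+1]).isalpha() == True:
--             if s.upper()[i] == s[i]:
--                 s1 = s1[0:i+1+m]+"O"+s1[i+1+m:len(s1)]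
--
--             else:
--                 s1 = s1[0:i+1+m]+"o"+s1[i+1+m:len(s1)]
--
--             if s.upper()[i+1] == s[i+1]:
--                 s1 = s1[0:i+2+m]+"P"+s1[i+2+m:len(s1)]
--
--             else:
--                 s1 = s1[0:i+2+m]+"p"+s1[i+2+m:len(s1)]
--
--             m=m+2
--     return s1
-- ===== SOURCE B (Python) =====
-- def weaveop(s):
--     out = []
--     for a, b in zip(s, s[1:]):
--         out.append(a)
--         if (a + b).isalpha():
--             out.append('O' if a.upper() == a else 'o')
--             out.append('P' if b.upper() == b else 'p')
--     out.extend(s[-1:])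
--     return ''.join(out)
-- ===== Notes on version B (the rewrite author's own statement) =====
-- stated objective: faster
-- what changed: Replaces the quadratic rebuild-by-slicing loop with insertion-offset bookkeeping by a single pass over adjacent pairs (zip) that appends to an output list and joins once.
import Mathlib
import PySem

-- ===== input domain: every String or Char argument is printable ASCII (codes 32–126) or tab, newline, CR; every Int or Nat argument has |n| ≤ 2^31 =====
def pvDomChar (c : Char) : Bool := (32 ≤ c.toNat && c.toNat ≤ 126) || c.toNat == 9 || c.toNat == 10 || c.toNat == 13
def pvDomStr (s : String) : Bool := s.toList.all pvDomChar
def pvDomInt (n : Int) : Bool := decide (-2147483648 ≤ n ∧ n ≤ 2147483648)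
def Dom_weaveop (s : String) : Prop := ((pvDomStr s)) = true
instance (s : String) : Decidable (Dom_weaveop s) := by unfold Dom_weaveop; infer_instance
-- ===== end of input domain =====

-- B rebuilds the string in one left-to-right pass over adjacent pairs instead of A's
-- repeated whole-string slice-and-reinsert with an insertion-offset counter (objective: faster).

-- ===== PORT A =====
-- one iteration of A's loop body: state (s1, m), loop index i
def weaveStepA (s : List Char) (st : List Char × Int) (i : Nat) : List Char × Int :=
  let s1 := st.1
  let m := st.2
  if PySem.Chars.strIsalpha [(PySem.List.pyGet? s (i : Int)).getD ' ',
                             (PySem.List.pyGet? s ((i : Int) + 1)).getD ' '] then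
    let s1a :=
      if (PySem.List.pyGet? (PySem.Chars.upper s) (i : Int)).getD ' '
          = (PySem.List.pyGet? s (i : Int)).getD ' ' then
        PySem.List.slice s1 (some 0) (some ((i : Int) + 1 + m)) ++ ['O'] ++
          PySem.List.slice s1 (some ((i : Int) + 1 + m)) (some (s1.length : Int))
      else
        PySem.List.slice s1 (some 0) (some ((i : Int) + 1 + m)) ++ ['o'] ++
          PySem.List.slice s1 (some ((i : Int) + 1 + m)) (some (s1.length : Int))
    let s1b :=
      if (PySem.List.pyGet? (PySem.Chars.upper s) ((i : Int) + 1)).getD ' '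
          = (PySem.List.pyGet? s ((i : Int) + 1)).getD ' ' then
        PySem.List.slice s1a (some 0) (some ((i : Int) + 2 + m)) ++ ['P'] ++
          PySem.List.slice s1a (some ((i : Int) + 2 + m)) (some (s1a.length : Int))
      else
        PySem.List.slice s1a (some 0) (some ((i : Int) + 2 + m)) ++ ['p'] ++
          PySem.List.slice s1a (some ((i : Int) + 2 + m)) (some (s1a.length : Int))
    (s1b, m + 2)
  else st

def weaveop (s : String) : String :=
  String.mk (((List.range (s.toList.length - 1)).foldl (weaveStepA s.toList) (s.toList, 0)).1)

-- ===== PORT B =====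
def weaveop_alt (s : String) : String :=
  String.mk
    (((List.zip s.toList (PySem.List.slice s.toList (some 1) none)).foldl
        (fun out (p : Char × Char) =>
          out ++ [p.1] ++
            (if PySem.Chars.strIsalpha [p.1, p.2] then
              [if PySem.Chars.upperChar p.1 = p.1 then 'O' else 'o',
               if PySem.Chars.upperChar p.2 = p.2 then 'P' else 'p']
            else [])) [])
      ++ PySem.List.slice s.toList (some (-1)) none)

-- ===== PRECONDITION & SPEC =====
def Spec_weaveop (s : String) (out : String) : Prop := out = weaveop_alt s
instance (s : String) (out : String) : Decidable (Spec_weaveop s out) := by unfold Spec_weaveop; infer_instance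

-- ===== CLAIM (what is proved, stated in full; the proofs are below) =====
def Claim_equal_weaveop : Prop := ∀ (s : String), Dom_weaveop s → Spec_weaveop s (weaveop s)

-- ===== LEMMAS AND PROOFS =====

-- the common pairwise weave both loops compute
def pvWeave : List Char → List Char
  | [] => []
  | [a] => [a]
  | a :: b :: r =>
    (if PySem.Chars.strIsalpha [a, b] then
      [a, if PySem.Chars.upperChar a = a then 'O' else 'o',
          if PySem.Chars.upperChar b = b then 'P' else 'p']
    else [a]) ++ pvWeave (b :: r)

theorem pvWeave_snoc (xs : List Char) (a b : Char) :
    pvWeave (xs ++ [a, b]) =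
      pvWeave (xs ++ [a]) ++
        (if PySem.Chars.strIsalpha [a, b] then
          [if PySem.Chars.upperChar a = a then 'O' else 'o',
           if PySem.Chars.upperChar b = b then 'P' else 'p', b]
        else [b]) := by
  have step : ∀ (u v : Char) (w : List Char),
      pvWeave (u :: v :: w) =
        (if PySem.Chars.strIsalpha [u, v] then
          [u, if PySem.Chars.upperChar u = u then 'O' else 'o',
              if PySem.Chars.upperChar v = v then 'P' else 'p']
        else [u]) ++ pvWeave (v :: w) := fun _ _ _ => rfl
  induction xs with
  | nil => simp only [List.nil_append, pvWeave]; split_ifs <;> simp [pvWeave]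
  | cons x xs ih =>
    cases xs with
    | nil =>
      simp only [List.cons_append, List.nil_append, pvWeave]
      split_ifs <;> simp [pvWeave]
    | cons y ys =>
      simp only [List.cons_append]
      rw [step x y (ys ++ [a, b]), step x y (ys ++ [a])]
      simp only [List.cons_append] at ih
      rw [ih]
      simp [List.append_assoc]

theorem pv_get_succ (cs : List Char) (k : Nat) (h : k + 1 < cs.length) :
    PySem.List.pyGet? cs ((k : Int) + 1) = some cs[k + 1] := by
  have h' : (k : Int) + 1 < (cs.length : Int) := by exact_mod_cast h
  have h0 : (0:Int) ≤ (k : Int) + 1 := by positivity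
  simp [PySem.List.pyGet?, PySem.List.pyIdx?, h', h0, List.getElem?_eq_getElem h]

theorem stepA_spec (cs F : List Char) (k : Nat) (hk : k + 1 < cs.length) :
    weaveStepA cs (F ++ cs.drop (k + 1), (F.length : Int) - ((k : Int) + 1)) k
      = if PySem.Chars.strIsalpha [cs[k], cs[k+1]] then
          (F ++ [if PySem.Chars.upperChar cs[k] = cs[k] then 'O' else 'o',
                 if PySem.Chars.upperChar cs[k+1] = cs[k+1] then 'P' else 'p'] ++ cs.drop (k + 1),
           (F.length : Int) - ((k : Int) + 1) + 2)
        else (F ++ cs.drop (k + 1), (F.length : Int) - ((k : Int) + 1)) := by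
  have hklt : k < cs.length := by omega
  have hga : PySem.List.pyGet? cs (k : Int) = some cs[k] := by
    simp [pysem, hklt]
  have hgb : PySem.List.pyGet? cs ((k : Int) + 1) = some cs[k + 1] := pv_get_succ cs k hk
  have hupper : PySem.Chars.upper cs = cs.map PySem.Chars.upperChar := by
    simp [PySem.Chars.upper]
  have hua : PySem.List.pyGet? (PySem.Chars.upper cs) (k : Int)
      = some (PySem.Chars.upperChar cs[k]) := by
    rw [hupper]; simp [pysem, hklt]
  have hub : PySem.List.pyGet? (PySem.Chars.upper cs) ((k : Int) + 1)
      = some (PySem.Chars.upperChar cs[k + 1]) := by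
    rw [hupper]
    have h' : (k : Int) + 1 < (cs.length : Int) := by exact_mod_cast hk
    have h0 : (0:Int) ≤ (k : Int) + 1 := by positivity
    simp [PySem.List.pyGet?, PySem.List.pyIdx?, h', h0, List.getElem?_eq_getElem hk]
  have hidx : (k : Int) + 1 + ((F.length : Int) - ((k : Int) + 1)) = ((F.length : Nat) : Int) := by ring
  have hidx2 : (k : Int) + 2 + ((F.length : Int) - ((k : Int) + 1)) = ((F.length + 1 : Nat) : Int) := by
    push_cast; ring
  have key : ∀ (X Y : List Char),
      PySem.List.slice (X ++ Y) (some 0) (some ((X.length : Nat) : Int)) = X := by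
    intro X Y; simp [pysem]
  have key2 : ∀ (X Y : List Char),
      PySem.List.slice (X ++ Y) (some ((X.length : Nat) : Int))
        (some (((X ++ Y).length : Nat) : Int)) = Y := by
    intro X Y; simp [pysem]
  have hsl1 : PySem.List.slice (F ++ cs.drop (k + 1)) (some 0) (some ((F.length : Nat) : Int)) = F :=
    key F (cs.drop (k + 1))
  have hsl2 : PySem.List.slice (F ++ cs.drop (k + 1)) (some ((F.length : Nat) : Int))
      (some (((F ++ cs.drop (k + 1)).length : Nat) : Int)) = cs.drop (k + 1) :=
    key2 F (cs.drop (k + 1))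
  unfold weaveStepA
  simp only [hga, hgb, hua, hub, Option.getD_some, hidx, hidx2, hsl1, hsl2]
  by_cases halpha : PySem.Chars.strIsalpha [cs[k], cs[k+1]] = true
  · rw [if_pos halpha, if_pos halpha]
    set oc : Char := if PySem.Chars.upperChar cs[k] = cs[k] then 'O' else 'o' with hoc
    set pc : Char := if PySem.Chars.upperChar cs[k+1] = cs[k+1] then 'P' else 'p' with hpc
    have e1 : (if PySem.Chars.upperChar cs[k] = cs[k]
        then F ++ ['O'] ++ cs.drop (k + 1) else F ++ ['o'] ++ cs.drop (k + 1))
        = F ++ [oc] ++ cs.drop (k + 1) := by rw [hoc]; split_ifs <;> rfl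
    rw [e1]
    have hX : F.length + 1 = (F ++ [oc]).length := by simp
    have hsl3 : PySem.List.slice (F ++ [oc] ++ cs.drop (k + 1)) (some 0)
        (some ((F.length + 1 : Nat) : Int)) = F ++ [oc] := by
      rw [hX]; exact key (F ++ [oc]) (cs.drop (k + 1))
    have hsl4 : PySem.List.slice (F ++ [oc] ++ cs.drop (k + 1)) (some ((F.length + 1 : Nat) : Int))
        (some (((F ++ [oc] ++ cs.drop (k + 1)).length : Nat) : Int)) = cs.drop (k + 1) := by
      rw [hX]; exact key2 (F ++ [oc]) (cs.drop (k + 1))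
    rw [hsl3, hsl4]
    have e2 : (if PySem.Chars.upperChar cs[k+1] = cs[k+1]
        then F ++ [oc] ++ ['P'] ++ cs.drop (k + 1) else F ++ [oc] ++ ['p'] ++ cs.drop (k + 1))
        = F ++ [oc, pc] ++ cs.drop (k + 1) := by rw [hpc]; split_ifs <;> simp
    rw [e2]
  · rw [if_neg halpha, if_neg halpha]

theorem weave_inv (cs : List Char) (k : Nat) (hk : k + 1 ≤ cs.length) :
    (List.range k).foldl (weaveStepA cs) (cs, 0)
      = (pvWeave (cs.take (k + 1)) ++ cs.drop (k + 1),
         ((pvWeave (cs.take (k + 1))).length : Int) - ((k : Int) + 1)) := by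
  induction k with
  | zero =>
    cases cs with
    | nil => simp at hk
    | cons c t =>
      simp only [List.range_zero, List.foldl_nil]
      have h1 : (c :: t).take 1 = [c] := rfl
      have h2 : pvWeave [c] = [c] := rfl
      rw [h1, h2]
      exact Prod.ext (by simp) (by simp)
  | succ k ih =>
    have hk' : k + 1 ≤ cs.length := by omega
    have hk1lt : k + 1 < cs.length := by omega
    rw [List.range_succ, List.foldl_append, ih hk', List.foldl_cons, List.foldl_nil,
      stepA_spec cs _ k hk1lt]
    set F := pvWeave (cs.take (k + 1)) with hF
    have hklt2 : k < cs.length := by omega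
    have htake1 : cs.take (k + 1) = cs.take k ++ [cs[k]] := by
      rw [List.take_succ]; simp [List.getElem?_eq_getElem hklt2]
    have htake2 : cs.take (k + 2) = cs.take (k + 1) ++ [cs[k + 1]] := by
      rw [show k + 2 = (k + 1) + 1 from rfl, List.take_succ]
      simp [List.getElem?_eq_getElem hk1lt]
    have htake2' : cs.take (k + 1 + 1) = cs.take k ++ [cs[k], cs[k + 1]] := by
      rw [List.take_add_one, List.getElem?_eq_getElem hk1lt, htake1, List.append_assoc]
      rfl
    have hdrop : cs.drop (k + 1) = cs[k + 1] :: cs.drop (k + 2) := by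
      rw [List.drop_eq_getElem_cons hk1lt]
    have hsnoc := pvWeave_snoc (cs.take k) cs[k] cs[k + 1]
    rw [← htake1, ← htake2'] at hsnoc
    by_cases halpha : PySem.Chars.strIsalpha [cs[k], cs[k+1]] = true
    · rw [if_pos halpha]
      rw [if_pos halpha] at hsnoc
      refine Prod.ext ?_ ?_
      · simp only [hsnoc, ← hF]
        rw [hdrop]
        simp
      · simp only [hsnoc, ← hF]
        simp only [List.length_append, List.length_cons, List.length_nil]
        push_cast; ring
    · rw [if_neg halpha]
      rw [if_neg halpha] at hsnoc
      refine Prod.ext ?_ ?_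
      · simp only [hsnoc, ← hF]
        rw [hdrop]
        simp
      · simp only [hsnoc, ← hF]
        simp only [List.length_append, List.length_cons, List.length_nil]
        push_cast; ring

theorem weaveop_eq_pvWeave (s : String) :
    weaveop s = String.mk (pvWeave s.toList) := by
  unfold weaveop
  cases hcs : s.toList with
  | nil => rfl
  | cons a tl =>
    cases tl with
    | nil => rfl
    | cons b r =>
      have hlen : (a :: b :: r).length - 1 = r.length + 1 := by simp
      rw [hlen, weave_inv (a :: b :: r) (r.length + 1) (by simp)]
      have ht : (a :: b :: r).take (r.length + 1 + 1) = a :: b :: r := by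
        apply List.take_of_length_le; simp
      have hd : (a :: b :: r).drop (r.length + 1 + 1) = [] := by
        apply List.drop_eq_nil_of_le; simp
      rw [ht, hd, List.append_nil]

theorem altFold (cs : List Char) (acc : List Char) :
    (List.zip cs (cs.drop 1)).foldl
        (fun out (p : Char × Char) =>
          out ++ [p.1] ++
            (if PySem.Chars.strIsalpha [p.1, p.2] then
              [if PySem.Chars.upperChar p.1 = p.1 then 'O' else 'o',
               if PySem.Chars.upperChar p.2 = p.2 then 'P' else 'p']
            else [])) acc
      ++ cs.drop (cs.length - 1)
    = acc ++ pvWeave cs := by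
  induction cs generalizing acc with
  | nil => simp [pvWeave]
  | cons a tl ih =>
    cases tl with
    | nil => simp [pvWeave]
    | cons b r =>
      have hz : List.zip (a :: b :: r) ((a :: b :: r).drop 1)
          = (a, b) :: List.zip (b :: r) r := by simp
      simp only [show List.drop 1 (b :: r) = r from rfl] at ih
      rw [hz, List.foldl_cons]
      have hdt : List.drop ((a :: b :: r).length - 1) (a :: b :: r)
          = List.drop ((b :: r).length - 1) (b :: r) := by
        have h : (a :: b :: r).length - 1 = ((b :: r).length - 1) + 1 := by simp
        rw [h, List.drop_succ_cons]
      rw [hdt, ih]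
      simp only [pvWeave]
      split_ifs <;> simp

theorem weaveop_alt_eq_pvWeave (s : String) :
    weaveop_alt s = String.mk (pvWeave s.toList) := by
  unfold weaveop_alt
  have h1 : PySem.List.slice s.toList (some 1) none = s.toList.drop 1 := by
    simp [pysem]
  have h2 : PySem.List.slice s.toList (some (-1)) none = s.toList.drop (s.toList.length - 1) := by
    simp [pysem]
  rw [h1, h2, altFold s.toList []]
  simp

-- ===== VERDICT (by name: the statement is the Claim_ definition above) =====
theorem weaveop_spec : Claim_equal_weaveop := by
  intro s _
  unfold Spec_weaveop
  rw [weaveop_eq_pvWeave, weaveop_alt_eq_pvWeave]
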